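-- pv_equiv track=rewrite | github.com/JINHXu/Early-Sepsis-Prediction-using-TSF | SepsisCheck.py | get_t_sofa
-- ===== SOURCE A (Python) =====
-- def get_t_sofa(sofa) -> int:
--     """
--     time of Sofa, probably needs to be initialized at first value, because if the first value is >2 this may already set t_sofa
--     """
--     for t, score in enumerate(sofa):
--         if t < 24:
--             if score >= 2 + min(sofa[:t+1]):
--                 return t
--         else:
--             if score >= 2 + min(sofa[t-24:t]): #Testing needed!! min(sofa[t,-24])+2 is supposed to be minimum of sofa from t and 24 hours back +2. Have not tested that line of code yet, so it is probably somewhat wrong.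
--                 return t
--     return False
-- ===== SOURCE B (Python) =====
-- def get_t_sofa(sofa) -> int:
--     # Monotonic deque of (index, value): values strictly increasing, front = window minimum.
--     dq = []
--     for t, score in enumerate(sofa):
--         if t < 24:
--             # window sofa[:t+1] includes the current element: push before querying
--             while dq and dq[-1][1] >= score:
--                 dq.pop()
--             dq.append((t, score))
--             if score >= 2 + dq[0][1]:
--                 return t
--         else:
--             # window sofa[t-24:t] excludes the current element: evict stale, query, then push
--             while dq and dq[0][0] < t - 24:
--                 dq.pop(0)
--             if score >= 2 + dq[0][1]:
--                 return t
--             while dq and dq[-1][1] >= score: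
--                 dq.pop()
--             dq.append((t, score))
--     return False
-- ===== Notes on version B (the rewrite author's own statement) =====
-- stated objective: faster
-- what changed: Replaced A's per-step min() over a freshly built 24-element slice by a single pass maintaining a monotonic deque of (index, value) pairs whose front is the sliding-window minimum, removing the repeated slice construction and rescan (push before query for t<24 where the window includes the current element, evict-then-query-then-push for t>=24); Pre_ excludes the inputs with no triggering index, where A (and B alike) falls through the loop and returns the bool False instead of an int.
-- outside the precondition, e.g. on get_t_sofa([]): A returns False, B returns False; on get_t_sofa([1, 1, 1]): A returns False, B returns False
import Mathlib
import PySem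

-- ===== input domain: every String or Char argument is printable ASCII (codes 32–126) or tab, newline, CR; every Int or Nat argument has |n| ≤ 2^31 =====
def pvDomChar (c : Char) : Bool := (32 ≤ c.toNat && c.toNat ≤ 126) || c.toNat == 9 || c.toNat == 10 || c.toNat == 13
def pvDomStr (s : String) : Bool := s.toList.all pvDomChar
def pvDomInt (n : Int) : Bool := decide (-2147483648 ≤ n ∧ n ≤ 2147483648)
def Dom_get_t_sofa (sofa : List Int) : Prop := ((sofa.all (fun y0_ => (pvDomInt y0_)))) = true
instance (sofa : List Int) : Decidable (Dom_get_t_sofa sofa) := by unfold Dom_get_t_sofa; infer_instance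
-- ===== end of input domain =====

-- B replaces A's per-step min() over a fresh 24-slice by a monotonic deque holding the sliding-window
-- minimum (objective: faster by a constant factor — no slice is rebuilt and rescanned per step).
-- Python's `return False` is ported as the Int 0 (False == 0; t = 0 never triggers the condition).

-- ===== PORT A =====
def get_t_sofa_go (sofa : List Int) (t : Nat) (rest : List Int) : Int :=
  match rest with
  | [] => 0  -- `return False` (Python False == 0)
  | score :: rs =>
    if (t : Int) < 24 then
      -- min(sofa[:t+1]); the slice is nonempty (t indexes sofa), so min? is some and the .getD 0 default is unreachable
      if 2 + (PySem.List.min? (PySem.List.slice sofa none (some ((t : Int) + 1))) (fun y => y)).getD 0 ≤ score then (t : Int)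
      else get_t_sofa_go sofa (t + 1) rs
    else
      -- min(sofa[t-24:t]); nonempty (24 elements), default unreachable
      if 2 + (PySem.List.min? (PySem.List.slice sofa (some ((t : Int) - 24)) (some (t : Int))) (fun y => y)).getD 0 ≤ score then (t : Int)
      else get_t_sofa_go sofa (t + 1) rs

def get_t_sofa (sofa : List Int) : Int := get_t_sofa_go sofa 0 sofa

-- ===== PORT B =====
-- `while dq and dq[-1][1] >= score: dq.pop()` — the cascade of pops from the back
def pvPopBack (v : Int) : List (Nat × Int) → List (Nat × Int)
  | [] => []
  | p :: rest =>
    match pvPopBack v rest with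
    | [] => if v ≤ p.2 then [] else [p]
    | q :: rs => p :: q :: rs

-- `while dq and dq[0][0] < bound: dq.pop(0)` — pops from the front
def pvEvict (bound : Int) (dq : List (Nat × Int)) : List (Nat × Int) :=
  dq.dropWhile (fun p => decide ((p.1 : Int) < bound))

-- `dq[0][1]`; at B's query points the deque is never empty (0 unreachable)
def pvFront (dq : List (Nat × Int)) : Int :=
  match dq with
  | [] => 0
  | p :: _ => p.2

def get_t_sofa_alt_go (t : Nat) (rest : List Int) (dq : List (Nat × Int)) : Int :=
  match rest with
  | [] => 0  -- `return False` (Python False == 0)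
  | score :: rs =>
    if (t : Int) < 24 then
      let dq1 := pvPopBack score dq ++ [(t, score)]
      if 2 + pvFront dq1 ≤ score then (t : Int)
      else get_t_sofa_alt_go (t + 1) rs dq1
    else
      let dq1 := pvEvict ((t : Int) - 24) dq
      if 2 + pvFront dq1 ≤ score then (t : Int)
      else get_t_sofa_alt_go (t + 1) rs (pvPopBack score dq1 ++ [(t, score)])

def get_t_sofa_alt (sofa : List Int) : Int := get_t_sofa_alt_go 0 sofa []

-- ===== PRECONDITION & SPEC =====
-- Pre_ excludes exactly the inputs with no triggering index: there A falls through the loop and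
-- returns the bool False, which is not a value of the declared return type int (B does the same).
def Pre_get_t_sofa (sofa : List Int) : Prop :=
  ∃ t < sofa.length, ∃ j < sofa.length,
    ((t < 24 ∧ j ≤ t) ∨ (24 ≤ t ∧ t - 24 ≤ j ∧ j < t)) ∧ sofa.getD j 0 + 2 ≤ sofa.getD t 0
instance (sofa : List Int) : Decidable (Pre_get_t_sofa sofa) := by unfold Pre_get_t_sofa; infer_instance
def pvWitness_get_t_sofa : List Int := [0, 2]

def Spec_get_t_sofa (sofa : List Int) (out : Int) : Prop := out = get_t_sofa_alt sofa
instance (sofa : List Int) (out : Int) : Decidable (Spec_get_t_sofa sofa out) := by unfold Spec_get_t_sofa; infer_instance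

-- ===== CLAIM (what is proved, stated in full; the proofs are below) =====
def Claim_equal_get_t_sofa : Prop := ∀ (sofa : List Int), Dom_get_t_sofa sofa → Pre_get_t_sofa sofa → Spec_get_t_sofa sofa (get_t_sofa sofa)

-- ===== LEMMAS AND PROOFS =====

-- index i is "good" w.r.t. the exclusive upper bound hiEx: strictly smaller than every later value
def goodB (sofa : List Int) (hiEx i : Nat) : Bool :=
  decide (∀ j, j < hiEx → i < j → sofa.getD i 0 < sofa.getD j 0)

-- the deque state: good indices of [lo, hiEx) with their values
def cand (sofa : List Int) (lo hiEx : Nat) : List (Nat × Int) :=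
  ((List.range' lo (hiEx - lo)).filter (goodB sofa hiEx)).map (fun i => (i, sofa.getD i 0))

-- minimum of sofa.getD over [lo, lo+n)
def minF (sofa : List Int) : Nat → Nat → Int
  | _, 0 => 0
  | lo, 1 => sofa.getD lo 0
  | lo, n + 2 => min (sofa.getD lo 0) (minF sofa (lo + 1) (n + 1))

theorem foldl_min_init (l : List Int) : ∀ a b : Int, l.foldl min (min a b) = min a (l.foldl min b) := by
  induction l with
  | nil => intro a b; simp
  | cons c l ih =>
    intro a b
    simp only [List.foldl_cons]
    rw [min_assoc, ih]

theorem minF_fold (sofa : List Int) :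
    ∀ n lo, minF sofa lo (n + 1)
      = ((List.range' (lo + 1) n).map (fun i => sofa.getD i 0)).foldl min (sofa.getD lo 0) := by
  intro n
  induction n with
  | zero => intro lo; simp [minF]
  | succ n ih =>
    intro lo
    have : List.range' (lo + 1) (n + 1) = (lo + 1) :: List.range' (lo + 2) n := by
      simp [List.range']
    rw [minF, ih (lo + 1), this]
    simp only [List.map_cons, List.foldl_cons]
    rw [← foldl_min_init]

theorem minF_le (sofa : List Int) :
    ∀ n lo i, lo ≤ i → i < lo + (n + 1) → minF sofa lo (n + 1) ≤ sofa.getD i 0 := by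
  intro n
  induction n with
  | zero =>
    intro lo i h1 h2
    have : i = lo := by omega
    subst this; simp [minF]
  | succ n ih =>
    intro lo i h1 h2
    rw [minF]
    rcases Nat.eq_or_lt_of_le h1 with h | h
    · subst h; exact min_le_left _ _
    · exact le_trans (min_le_right _ _) (ih (lo + 1) i h (by omega))

theorem minF_mem (sofa : List Int) :
    ∀ n lo, ∃ i, lo ≤ i ∧ i < lo + (n + 1) ∧ minF sofa lo (n + 1) = sofa.getD i 0 := by
  intro n
  induction n with
  | zero => intro lo; exact ⟨lo, le_refl _, by omega, by simp [minF]⟩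
  | succ n ih =>
    intro lo
    rw [minF]
    rcases ih (lo + 1) with ⟨i, hi1, hi2, hi3⟩
    rcases le_total (sofa.getD lo 0) (minF sofa (lo + 1) (n + 1)) with h | h
    · exact ⟨lo, le_refl _, by omega, by rw [min_eq_left h]⟩
    · exact ⟨i, by omega, by omega, by rw [min_eq_right h, hi3]⟩

-- A's compared value: min? over the slice equals minF
theorem min_slice (sofa : List Int) (lo hiEx : Nat) (h1 : lo < hiEx) (h2 : hiEx ≤ sofa.length) :
    (PySem.List.min? ((sofa.drop lo).take (hiEx - lo)) (fun y => y)).getD 0 = minF sofa lo (hiEx - lo) := by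
  have hw : (sofa.drop lo).take (hiEx - lo) = (List.range' lo (hiEx - lo)).map (fun i => sofa.getD i 0) := by
    apply List.ext_getElem
    · simp; omega
    · intro k hk1 hk2
      simp only [List.getElem_take, List.getElem_drop, List.getElem_map, List.getElem_range']
      rw [List.getD_eq_getElem]
      · simp
      · simp at hk2; omega
  obtain ⟨n, hn⟩ : ∃ n, hiEx - lo = n + 1 := ⟨hiEx - lo - 1, by omega⟩
  rw [hw, hn]
  have : List.range' lo (n + 1) = lo :: List.range' (lo + 1) n := by simp [List.range']
  rw [this, List.map_cons, PySem.List.min?_id_cons, Option.getD_some, minF_fold]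

-- step recurrence for cand
theorem cand_cons (sofa : List Int) (lo hiEx : Nat) (h : lo < hiEx) :
    cand sofa lo hiEx
      = (if goodB sofa hiEx lo then [(lo, sofa.getD lo 0)] else []) ++ cand sofa (lo + 1) hiEx := by
  unfold cand
  obtain ⟨n, hn⟩ : ∃ n, hiEx - lo = n + 1 := ⟨hiEx - lo - 1, by omega⟩
  have hn' : hiEx - (lo + 1) = n := by omega
  rw [hn, hn']
  have : List.range' lo (n + 1) = lo :: List.range' (lo + 1) n := by simp [List.range']
  rw [this, List.filter_cons]
  split_ifs with hg <;> simp

-- every index in cand is ≥ lo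
theorem cand_idx_ge (sofa : List Int) (lo hiEx : Nat) (p : Nat × Int) (hp : p ∈ cand sofa lo hiEx) :
    lo ≤ p.1 := by
  unfold cand at hp
  rcases List.mem_map.1 hp with ⟨i, hi, rfl⟩
  have := List.mem_range'_1.1 (List.mem_filter.1 hi).1
  exact this.1

-- values along cand are strictly increasing
theorem cand_pairwise (sofa : List Int) (lo hiEx : Nat) :
    (cand sofa lo hiEx).Pairwise (fun p q => p.2 < q.2) := by
  unfold cand
  rw [List.pairwise_map]
  apply List.Pairwise.imp_of_mem (R := fun a b => a < b)
  · intro a b ha hb hab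
    have hga := (List.mem_filter.1 ha).2
    have hb' := List.mem_range'_1.1 (List.mem_filter.1 hb).1
    simp only [goodB, decide_eq_true_eq] at hga
    exact hga b (by omega) hab
  · exact (List.pairwise_lt_range' _).filter _

-- pvPopBack on a strictly-increasing deque is a filter
theorem popBack_eq_filter (v : Int) :
    ∀ l : List (Nat × Int), l.Pairwise (fun p q => p.2 < q.2) →
      pvPopBack v l = l.filter (fun p => decide (p.2 < v)) := by
  intro l
  induction l with
  | nil => intro _; rfl
  | cons p rest ih =>
    intro h
    rcases List.pairwise_cons.1 h with ⟨hp, hrest⟩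
    rw [pvPopBack, ih hrest, List.filter_cons]
    cases hf : rest.filter (fun p => decide (p.2 < v)) with
    | nil =>
      by_cases hv : v ≤ p.2
      · simp [hv, not_lt.2 hv]
      · simp [hv, lt_of_not_ge hv]
    | cons q rs =>
      have hq : q ∈ rest ∧ q.2 < v := by
        have : q ∈ rest.filter (fun p => decide (p.2 < v)) := by rw [hf]; exact List.mem_cons_self
        rcases List.mem_filter.1 this with ⟨h1, h2⟩
        exact ⟨h1, by simpa using h2⟩
      have hpv : p.2 < v := lt_trans (hp q hq.1) hq.2
      simp [hpv]

-- pushing index t onto the deque for [lo, t) yields the deque for [lo, t+1)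
theorem cand_push (sofa : List Int) (lo t : Nat) (hlo : lo ≤ t) :
    pvPopBack (sofa.getD t 0) (cand sofa lo t) ++ [(t, sofa.getD t 0)] = cand sofa lo (t + 1) := by
  rw [popBack_eq_filter _ _ (cand_pairwise sofa lo t)]
  unfold cand
  rw [List.filter_map, List.filter_filter]
  have h1 : t + 1 - lo = (t - lo) + 1 := by omega
  rw [h1, List.range'_concat]
  have h2 : lo + 1 * (t - lo) = t := by omega
  rw [h2, List.filter_append, List.map_append]
  have hgt : goodB sofa (t + 1) t = true := by
    simp only [goodB, decide_eq_true_eq]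
    intro j hj1 hj2; omega
  have h3 : (List.range' lo (t - lo)).filter (goodB sofa (t + 1))
      = (List.range' lo (t - lo)).filter
          (fun a => ((fun p : Nat × Int => decide (p.2 < sofa.getD t 0)) ∘ (fun i => (i, sofa.getD i 0))) a && goodB sofa t a) := by
    apply List.filter_congr
    intro i hi
    have hit : i < t := by
      have := List.mem_range'_1.1 hi
      omega
    simp only [goodB, Function.comp_apply]
    rw [Bool.eq_iff_iff]
    simp only [Bool.and_eq_true, decide_eq_true_eq]
    constructor
    · intro h
      exact ⟨h t (by omega) hit, fun j hj1 hj2 => h j (by omega) hj2⟩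
    · intro ⟨ha, hb⟩ j hj1 hj2
      rcases Nat.lt_succ_iff_lt_or_eq.1 hj1 with h | h
      · exact hb j h hj2
      · subst h; exact ha
  rw [h3]
  simp [hgt]

-- the front of the deque is the window minimum (and the deque is nonempty)
theorem cand_front (sofa : List Int) :
    ∀ n lo, pvFront (cand sofa lo (lo + (n + 1))) = minF sofa lo (n + 1)
          ∧ cand sofa lo (lo + (n + 1)) ≠ [] := by
  intro n
  induction n with
  | zero =>
    intro lo
    have : cand sofa lo (lo + 1)
        = (if goodB sofa (lo + 1) lo then [(lo, sofa.getD lo 0)] else []) ++ cand sofa (lo + 1) (lo + 1) :=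
      cand_cons sofa lo (lo + 1) (by omega)
    have hg : goodB sofa (lo + 1) lo = true := by
      simp only [goodB, decide_eq_true_eq]; intro j h1 h2; omega
    have hnil : cand sofa (lo + 1) (lo + 1) = [] := by unfold cand; simp
    rw [this, hg, hnil]
    exact ⟨by simp [pvFront, minF], by simp⟩
  | succ n ih =>
    intro lo
    have hrec : cand sofa lo (lo + (n + 2))
        = (if goodB sofa (lo + (n + 2)) lo then [(lo, sofa.getD lo 0)] else [])
          ++ cand sofa (lo + 1) (lo + (n + 2)) :=
      cand_cons sofa lo (lo + (n + 2)) (by omega)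
    have harg : lo + (n + 2) = (lo + 1) + (n + 1) := by omega
    rcases ih (lo + 1) with ⟨ihf, ihne⟩
    by_cases hg : goodB sofa (lo + (n + 2)) lo = true
    · rw [hrec, hg]
      constructor
      · simp only [if_true, List.cons_append, pvFront, minF]
        -- good lo: sofa.getD lo is strictly below everything later, so it is the min
        simp only [goodB, decide_eq_true_eq] at hg
        rcases minF_mem sofa n (lo + 1) with ⟨i, hi1, hi2, hi3⟩
        have : sofa.getD lo 0 < minF sofa (lo + 1) (n + 1) := by
          rw [hi3]; exact hg i (by omega) (by omega)
        rw [min_eq_left (le_of_lt this)]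
      · simp
    · rw [hrec, if_neg hg]
      simp only [List.nil_append]
      rw [harg]
      refine ⟨?_, ihne⟩
      rw [ihf, minF]
      -- ¬good lo: some later value is ≤ sofa.getD lo, so the min ignores lo
      simp only [goodB, decide_eq_true_eq, not_forall] at hg
      rcases hg with ⟨j, hj1, hj2, hj3⟩
      have : minF sofa (lo + 1) (n + 1) ≤ sofa.getD lo 0 :=
        le_trans (minF_le sofa n (lo + 1) j (by omega) (by omega)) (le_of_not_gt
          (by exact fun h => hj3 h))
      rw [min_eq_right this]

-- evicting indices below lo+1 from the deque for [lo, hiEx) yields the deque for [lo+1, hiEx)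
theorem cand_evict (sofa : List Int) (lo hiEx : Nat) (b : Int) (h : lo < hiEx)
    (hb : b = (lo : Int) + 1) :
    pvEvict b (cand sofa lo hiEx) = cand sofa (lo + 1) hiEx := by
  have hself : ∀ l : List (Nat × Int), (∀ p ∈ l, lo + 1 ≤ p.1) →
      l.dropWhile (fun p => decide ((p.1 : Int) < b)) = l := by
    intro l hl
    cases l with
    | nil => rfl
    | cons q rs =>
      rw [List.dropWhile_cons]
      have := hl q List.mem_cons_self
      have : ¬ ((q.1 : Int) < b) := by rw [hb]; omega
      simp [this]
  rw [cand_cons sofa lo hiEx h]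
  unfold pvEvict
  split_ifs with hg
  · rw [List.cons_append, List.nil_append, List.dropWhile_cons]
    have : ((lo : Int) < b) := by rw [hb]; omega
    simp only [this, decide_true, if_true]
    exact hself _ (fun p hp => cand_idx_ge sofa (lo + 1) hiEx p hp)
  · rw [List.nil_append]
    exact hself _ (fun p hp => cand_idx_ge sofa (lo + 1) hiEx p hp)

-- an eviction with a bound ≤ every index is a no-op
theorem evict_noop (sofa : List Int) (lo hiEx : Nat) (b : Int) (hb : b ≤ (lo : Int)) :
    pvEvict b (cand sofa lo hiEx) = cand sofa lo hiEx := by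
  unfold pvEvict
  cases hc : cand sofa lo hiEx with
  | nil => rfl
  | cons q rs =>
    rw [List.dropWhile_cons]
    have hq : lo ≤ q.1 := cand_idx_ge sofa lo hiEx q (hc ▸ List.mem_cons_self)
    have : ¬ ((q.1 : Int) < b) := by omega
    simp [this]

-- getD at an index that exists
theorem drop_head_getD (sofa : List Int) (t : Nat) (score : Int) (rs : List Int)
    (h : sofa.drop t = score :: rs) : sofa.getD t 0 = score ∧ t < sofa.length := by
  have hlen : t < sofa.length := by
    by_contra hc
    rw [List.drop_eq_nil_of_le (by omega)] at h
    simp at h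
  have h0 : sofa[t]? = some score := by
    have : (sofa.drop t)[0]? = some score := by rw [h]; rfl
    rwa [List.getElem?_drop, Nat.add_zero] at this
  exact ⟨by simp [List.getD, h0], hlen⟩

-- the main loop invariant: A's scan equals B's scan with deque cand (t-25) t
theorem go_eq (sofa : List Int) :
    ∀ rest t, rest = sofa.drop t →
      get_t_sofa_go sofa t rest = get_t_sofa_alt_go t rest (cand sofa (t - 25) t) := by
  intro rest
  induction rest with
  | nil => intro t _; rfl
  | cons score rs ih =>
    intro t hrest
    rcases drop_head_getD sofa t score rs hrest.symm with ⟨hget, hlen⟩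
    have hrs : rs = sofa.drop (t + 1) := by
      have := congrArg List.tail hrest
      simpa [List.tail_drop] using this
    rw [get_t_sofa_go, get_t_sofa_alt_go]
    by_cases ht : (t : Int) < 24
    · have htn : t < 24 := by exact_mod_cast ht
      have h25 : t - 25 = 0 := by omega
      have h25' : (t + 1) - 25 = 0 := by omega
      -- push, then query
      have hpush : pvPopBack score (cand sofa (t - 25) t) ++ [(t, score)] = cand sofa 0 (t + 1) := by
        rw [h25, ← hget]; exact cand_push sofa 0 t (by omega)
      have hfront : pvFront (cand sofa 0 (t + 1)) = minF sofa 0 (t + 1) := by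
        have := (cand_front sofa t 0).1
        simpa using this
      -- A's slice value
      have hsliceA : PySem.List.slice sofa none (some ((t : Int) + 1)) = (sofa.drop 0).take (t + 1 - 0) := by
        have : ((t : Int) + 1) = ((t + 1 : Nat) : Int) := by push_cast; ring
        rw [this, PySem.List.slice_to_natCast]
        simp
      have hminA : (PySem.List.min? (PySem.List.slice sofa none (some ((t : Int) + 1))) (fun y => y)).getD 0
          = minF sofa 0 (t + 1) := by
        rw [hsliceA, min_slice sofa 0 (t + 1) (by omega) (by omega)]
        rfl
      rw [if_pos ht, if_pos ht]
      simp only [hpush, hfront, hminA]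
      split_ifs with hc
      · rfl
      · rw [ih (t + 1) hrs, h25']
    · have htn : 24 ≤ t := by omega
      -- evict, query, then push
      have hevict : pvEvict ((t : Int) - 24) (cand sofa (t - 25) t) = cand sofa (t - 24) t := by
        by_cases h24 : t = 24
        · subst h24
          simp only [show ((24 : Nat) : Int) - 24 = 0 by norm_num, show (24 : Nat) - 25 = 0 by norm_num]
          exact evict_noop sofa 0 24 0 (by norm_num)
        · have h1 : t - 25 < t := by omega
          have h2 : (t : Int) - 24 = ((t - 25 : Nat) : Int) + 1 := by omega
          have h3 : (t - 25) + 1 = t - 24 := by omega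
          rw [cand_evict sofa (t - 25) t _ h1 h2, h3]
      have hfront : pvFront (cand sofa (t - 24) t) = minF sofa (t - 24) 24 := by
        have := (cand_front sofa 23 (t - 24)).1
        have harg : (t - 24) + (23 + 1) = t := by omega
        rw [harg] at this
        exact this
      have hsliceA : PySem.List.slice sofa (some ((t : Int) - 24)) (some (t : Int))
          = (sofa.drop (t - 24)).take (t - (t - 24)) := by
        have h1 : ((t : Int) - 24) = ((t - 24 : Nat) : Int) := by omega
        rw [h1, PySem.List.slice_natCast]
      have hminA : (PySem.List.min? (PySem.List.slice sofa (some ((t : Int) - 24)) (some (t : Int))) (fun y => y)).getD 0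
          = minF sofa (t - 24) 24 := by
        rw [hsliceA, min_slice sofa (t - 24) t (by omega) (by omega)]
        have : t - (t - 24) = 24 := by omega
        rw [this]
      have hpush : pvPopBack score (cand sofa (t - 24) t) ++ [(t, score)] = cand sofa ((t + 1) - 25) (t + 1) := by
        have h3 : (t + 1) - 25 = t - 24 := by omega
        rw [h3, ← hget]
        exact cand_push sofa (t - 24) t (by omega)
      rw [if_neg ht, if_neg ht]
      simp only [hevict, hfront, hminA]
      split_ifs with hc
      · rfl
      · rw [ih (t + 1) hrs, ← hpush]

-- ===== VERDICT (by name: the statement is the Claim_ definition above) =====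
-- the two ports agree on every input (both use the Int 0 for Python's False); Pre_ is not needed here
theorem get_t_sofa_spec : Claim_equal_get_t_sofa := by
  intro sofa _ _
  unfold Spec_get_t_sofa get_t_sofa get_t_sofa_alt
  have h := go_eq sofa sofa 0 (by simp)
  simpa [cand] using h
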